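-- pv_equiv track=rewrite | github.com/GlenABradley/EthicalAI | scripts/fix_markdown.py | fix_code_blocks
-- ===== SOURCE A (Python) =====
-- def fix_code_blocks(content: str) -> str:
--     """Ensure code blocks are properly formatted and have language specified."""
--     lines = content.splitlines()
--     new_lines = []
--     i = 0
--
--     while i < len(lines):
--         line = lines[i]
--
--         # Handle fenced code blocks
--         if line.strip().startswith(('```', '~~~')):
--             # Add blank line before code block if needed
--             if i > 0 and new_lines and new_lines[-1].strip() != '':
--                 new_lines.append('')
--
--             # Get the marker and language
--             marker = line.strip().split()[0] if line.strip() else '```'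
--             lang = line.strip()[len(marker):].strip()
--
--             # If no language specified, default to 'text'
--             if not lang and marker in ('```', '~~~'):
--                 new_lines.append(f'{marker}text')
--             else:
--                 new_lines.append(line.strip())
--
--             # Find end of code block
--             j = i + 1
--             while j < len(lines) and not lines[j].strip().startswith(marker):
--                 new_lines.append(lines[j])
--                 j += 1
--
--             if j < len(lines):
--                 new_lines.append(marker)  # Add the closing marker
--                 # Add blank line after code block if needed
--                 if j + 1 < len(lines) and lines[j+1].strip() != '':
--                     new_lines.append('')
--                 i = j + 1
--             else:
--                 i = j
--         else:
--             new_lines.append(line)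
--             i += 1
--
--     return '\n'.join(new_lines)
-- ===== SOURCE B (Python) =====
-- def fix_code_blocks(content: str) -> str:
--     """Ensure code blocks are properly formatted and have language specified."""
--     lines = content.splitlines()
--     out = []
--     in_block = False
--     marker = ''
--     for i, line in enumerate(lines):
--         stripped = line.strip()
--         if in_block:
--             if stripped.startswith(marker):
--                 out.append(marker)
--                 if i + 1 < len(lines) and lines[i + 1].strip() != '':
--                     out.append('')
--                 in_block = False
--             else:
--                 out.append(line)
--         elif stripped.startswith(('```', '~~~')):
--             if i > 0 and out and out[-1].strip() != '':
--                 out.append('')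
--             marker = stripped.split()[0] if stripped else '```'
--             lang = stripped[len(marker):].strip()
--             if not lang and marker in ('```', '~~~'):
--                 out.append(marker + 'text')
--             else:
--                 out.append(stripped)
--             in_block = True
--         else:
--             out.append(line)
--     return '\n'.join(out)
-- ===== Notes on version B (the rewrite author's own statement) =====
-- stated objective: idiomatic
-- what changed: A's outer while-loop with an inner j-scan and i=j+1 index jump is replaced by a single flat pass over enumerate(lines) driven by an (in_block, marker) state machine.
import Mathlib
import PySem

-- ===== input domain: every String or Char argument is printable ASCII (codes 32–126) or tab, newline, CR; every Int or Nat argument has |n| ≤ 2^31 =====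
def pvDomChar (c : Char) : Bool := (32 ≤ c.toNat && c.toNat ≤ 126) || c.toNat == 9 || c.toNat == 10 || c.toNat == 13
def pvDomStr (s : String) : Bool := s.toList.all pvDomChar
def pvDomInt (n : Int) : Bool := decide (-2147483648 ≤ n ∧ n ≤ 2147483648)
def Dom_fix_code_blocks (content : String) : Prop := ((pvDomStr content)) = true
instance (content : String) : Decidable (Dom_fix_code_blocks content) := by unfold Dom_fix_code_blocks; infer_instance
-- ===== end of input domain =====

-- B replaces A's nested while-loops (inner j-scan and i = j+1 index jump) by one flat pass over
-- enumerate(lines) carrying an (in_block, marker) state machine (objective: idiomatic).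

-- Straight-line expressions both Pythons compute verbatim at a fence line:
-- marker = line.strip().split()[0] if line.strip() else '```'
def pvMarkerOf (s : String) : String :=
  if s ≠ "" then (PySem.Str.split₀ s).headD "" else "```"

-- the line emitted for the opening fence ('text' default when no language is given)
def pvOpenLine (s : String) : String :=
  let marker := pvMarkerOf s
  let lang := PySem.Str.strip (PySem.Str.slice s (some (PySem.Str.len marker)) none)
  if lang = "" ∧ (marker = "```" ∨ marker = "~~~") then marker ++ "text" else s

-- blank line before the block if needed, then the opening fence line
def pvOpenAcc (i : Nat) (line : String) (acc : List String) : List String :=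
  (if 0 < i ∧ acc ≠ [] ∧ PySem.Str.strip (acc.getLastD "") ≠ "" then acc ++ [""] else acc) ++
    [pvOpenLine (PySem.Str.strip line)]

-- closing marker, then blank line after the block if needed (j = index of the closing line)
def pvCloseAcc (lines : List String) (j : Nat) (marker : String) (acc : List String) :
    List String :=
  if j + 1 < lines.length ∧ PySem.Str.strip (lines.getD (j + 1) "") ≠ "" then
    (acc ++ [marker]) ++ [""] else acc ++ [marker]

-- ===== PORT A =====

-- A's inner 'while j < len(lines) and not lines[j].strip().startswith(marker)' loop:
-- appends the scanned lines and returns the final j together with the accumulator.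
-- fuel = number of remaining lines, only to make the while-loop structurally total;
-- it is lines.length - j at every call, so the 0-fuel arm coincides with the exit test.
def pvScanA (lines : List String) (marker : String) :
    Nat → Nat → List String → Nat × List String
  | 0, j, acc => (j, acc)
  | fuel + 1, j, acc =>
    if h : j < lines.length then
      if PySem.Str.startswith (PySem.Str.strip lines[j]) marker then (j, acc)
      else pvScanA lines marker fuel (j + 1) (acc ++ [lines[j]])
    else (j, acc)

-- A's outer 'while i < len(lines)' loop (fuel ≥ lines.length - i suffices: i grows by ≥ 1)
def pvGoA (lines : List String) : Nat → Nat → List String → List String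
  | 0, _, acc => acc
  | fuel + 1, i, acc =>
    if h : i < lines.length then
      if PySem.Str.startswith (PySem.Str.strip lines[i]) "```" ||
          PySem.Str.startswith (PySem.Str.strip lines[i]) "~~~" then
        match pvScanA lines (pvMarkerOf (PySem.Str.strip lines[i])) (lines.length - (i + 1))
            (i + 1) (pvOpenAcc i lines[i] acc) with
        | (j, acc3) =>
          if j < lines.length then
            pvGoA lines fuel (j + 1)
              (pvCloseAcc lines j (pvMarkerOf (PySem.Str.strip lines[i])) acc3)
          else
            pvGoA lines fuel j acc3
      else
        pvGoA lines fuel (i + 1) (acc ++ [lines[i]])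
    else acc

def fix_code_blocks (content : String) : String :=
  PySem.Str.join "\n"
    (pvGoA (PySem.Str.splitlines content) (PySem.Str.splitlines content).length 0 [])

-- ===== PORT B =====

-- one step of B's flat pass: state (in_block, marker, out), input (line, i)
def pvStepB (lines : List String) (st : Bool × String × List String) (p : String × Nat) :
    Bool × String × List String :=
  match st with
  | (inB, marker, out) =>
    if inB then
      if PySem.Str.startswith (PySem.Str.strip p.1) marker then
        (false, marker, pvCloseAcc lines p.2 marker out)
      else (true, marker, out ++ [p.1])
    else if PySem.Str.startswith (PySem.Str.strip p.1) "```" ||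
        PySem.Str.startswith (PySem.Str.strip p.1) "~~~" then
      (true, pvMarkerOf (PySem.Str.strip p.1), pvOpenAcc p.2 p.1 out)
    else (inB, marker, out ++ [p.1])

def fix_code_blocks_alt (content : String) : String :=
  PySem.Str.join "\n"
    (((PySem.Str.splitlines content).zipIdx.foldl
        (pvStepB (PySem.Str.splitlines content)) (false, "", [])).2.2)

-- ===== PRECONDITION & SPEC =====
def Spec_fix_code_blocks (content : String) (out : String) : Prop := out = fix_code_blocks_alt content
instance (content : String) (out : String) : Decidable (Spec_fix_code_blocks content out) := by unfold Spec_fix_code_blocks; infer_instance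

-- ===== CLAIM (what is proved, stated in full; the proofs are below) =====
def Claim_equal_fix_code_blocks : Prop := ∀ (content : String), Dom_fix_code_blocks content → Spec_fix_code_blocks content (fix_code_blocks content)

-- ===== LEMMAS AND PROOFS =====

-- the scan never moves backwards
theorem pvScanA_ge (lines : List String) (marker : String) (fuel j : Nat) (acc : List String) :
    j ≤ (pvScanA lines marker fuel j acc).1 := by
  fun_induction pvScanA lines marker fuel j acc with
  | case1 => simp
  | case2 => simp
  | case3 j acc h hne ih => omega
  | case4 => simp

-- once past the end, A's outer loop stops whatever fuel is left
theorem pvGoA_of_ge (lines : List String) (fuel i : Nat) (acc : List String)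
    (h : lines.length ≤ i) : pvGoA lines fuel i acc = acc := by
  cases fuel with
  | zero => rfl
  | succ fuel => simp [pvGoA, Nat.not_lt.mpr h]

-- B's fold, run from index j while inside a block with enough fuel for the scan,
-- equals the continuation of A's inner scan
theorem pvFold_inside (lines : List String) (marker : String) (fuel j : Nat) (acc : List String)
    (hf : lines.length ≤ fuel + j) :
    ((lines.drop j).zipIdx j).foldl (pvStepB lines) (true, marker, acc) =
      (match pvScanA lines marker fuel j acc with
       | (j', acc') =>
        if j' < lines.length then
          ((lines.drop (j' + 1)).zipIdx (j' + 1)).foldl (pvStepB lines)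
            (false, marker, pvCloseAcc lines j' marker acc')
        else (true, marker, acc')) := by
  fun_induction pvScanA lines marker fuel j acc with
  | case1 j acc =>
    rw [List.drop_eq_nil_of_le (by omega)]
    simp only [List.zipIdx_nil, List.foldl_nil]
    simp [Nat.not_lt.mpr (show lines.length ≤ j by omega)]
  | case2 fuel j acc h hsw =>
    simp only [h, ↓reduceIte]
    simp only [List.drop_eq_getElem_cons h, List.zipIdx_cons, List.foldl_cons]
    have hstep : pvStepB lines (true, marker, acc) (lines[j], j) =
        (false, marker, pvCloseAcc lines j marker acc) := by
      simp only [pvStepB]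
      rw [if_pos trivial, if_pos hsw]
    rw [hstep]
  | case3 fuel j acc h hsw ih =>
    rw [← ih (by omega)]
    simp only [List.drop_eq_getElem_cons h, List.zipIdx_cons, List.foldl_cons]
    have hstep : pvStepB lines (true, marker, acc) (lines[j], j) =
        (true, marker, acc ++ [lines[j]]) := by
      simp only [pvStepB]
      rw [if_pos trivial, if_neg hsw]
    rw [hstep]
  | case4 fuel j acc h =>
    rw [List.drop_eq_nil_of_le (Nat.le_of_not_lt h)]
    simp [h]

-- B's fold, run from index i while outside a block (any leftover marker m), equals A's outer loop
theorem pvFold_outside (lines : List String) (fuel i : Nat) (acc : List String) :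
    ∀ m, lines.length ≤ fuel + i →
      (((lines.drop i).zipIdx i).foldl (pvStepB lines) (false, m, acc)).2.2 =
        pvGoA lines fuel i acc := by
  fun_induction pvGoA lines fuel i acc with
  | case1 i acc =>
    intro m hf
    rw [List.drop_eq_nil_of_le (by omega)]
    simp
  | case2 fuel i acc h hsw j acc3 heq hj ih =>
    intro m hf
    have hge : i + 1 ≤ j := by
      have := pvScanA_ge lines (pvMarkerOf (PySem.Str.strip lines[i]))
        (lines.length - (i + 1)) (i + 1) (pvOpenAcc i lines[i] acc)
      rw [heq] at this; exact this
    simp only [List.drop_eq_getElem_cons h, List.zipIdx_cons, List.foldl_cons]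
    have hstep : pvStepB lines (false, m, acc) (lines[i], i) =
        (true, pvMarkerOf (PySem.Str.strip lines[i]), pvOpenAcc i lines[i] acc) := by
      simp only [pvStepB]
      rw [if_neg Bool.false_ne_true, if_pos hsw]
    rw [hstep, pvFold_inside lines _ (lines.length - (i + 1)) (i + 1) _ (by omega), heq]
    simp only [hj, ↓reduceIte]
    exact ih (pvMarkerOf (PySem.Str.strip lines[i])) (by omega)
  | case3 fuel i acc h hsw j acc3 heq hj ih =>
    intro m hf
    simp only [List.drop_eq_getElem_cons h, List.zipIdx_cons, List.foldl_cons]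
    have hstep : pvStepB lines (false, m, acc) (lines[i], i) =
        (true, pvMarkerOf (PySem.Str.strip lines[i]), pvOpenAcc i lines[i] acc) := by
      simp only [pvStepB]
      rw [if_neg Bool.false_ne_true, if_pos hsw]
    rw [hstep, pvFold_inside lines _ (lines.length - (i + 1)) (i + 1) _ (by omega), heq]
    simp only [hj, ↓reduceIte]
    rw [pvGoA_of_ge lines fuel j acc3 (Nat.le_of_not_lt hj)]
  | case4 fuel i acc h hsw ih =>
    intro m hf
    simp only [List.drop_eq_getElem_cons h, List.zipIdx_cons, List.foldl_cons]
    have hstep : pvStepB lines (false, m, acc) (lines[i], i) =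
        (false, m, acc ++ [lines[i]]) := by
      simp only [pvStepB]
      rw [if_neg Bool.false_ne_true, if_neg hsw]
    rw [hstep]
    exact ih m (by omega)
  | case5 fuel i acc h =>
    intro m hf
    rw [List.drop_eq_nil_of_le (Nat.le_of_not_lt h)]
    simp

-- ===== VERDICT (by name: the statement is the Claim_ definition above) =====
theorem fix_code_blocks_spec : Claim_equal_fix_code_blocks := by
  intro content _
  unfold Spec_fix_code_blocks fix_code_blocks fix_code_blocks_alt
  have h := pvFold_outside (PySem.Str.splitlines content)
    (PySem.Str.splitlines content).length 0 [] "" (by omega)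
  simp only [List.drop_zero] at h
  rw [h]
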